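-- pv_equiv track=rewrite | github.com/huangjiyi/paddle_notes | ops_yaml_normalization/get_consistent_ops.py | verify_both_consistency
-- ===== SOURCE A (Python) =====
-- def verify_both_consistency(
--     consistent_ops, bw_consistent_ops, bw_inconsistent_ops
-- ):
--     both_consistent_ops = []
--     both_consistent_ops_bw = []
--     for op in consistent_ops:
--         both_consistent = True
--         ops_bw = []
--         for grad_suffix in ['_grad', '_double_grad', '_triple_grad']:
--             bw_op = op.rstrip('_') + grad_suffix
--             if bw_op in bw_consistent_ops:
--                 ops_bw.append(bw_op)
--             if bw_op in bw_inconsistent_ops: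
--                 both_consistent = False
--                 break
--         if both_consistent:
--             both_consistent_ops.append(op)
--             both_consistent_ops_bw.extend(ops_bw)
--
--     return both_consistent_ops, both_consistent_ops_bw
-- ===== SOURCE B (Python) =====
-- GRAD_SUFFIXES = ('_grad', '_double_grad', '_triple_grad')
--
--
-- def _index(bw_list):
--     # (base, suffix) for every way a bw name decomposes as base + known grad suffix
--     keys = set()
--     for bw in bw_list:
--         for s in GRAD_SUFFIXES:
--             if bw.endswith(s):
--                 keys.add((bw[:-len(s)], s))
--     return keys
--
--
-- def verify_both_consistency(
--     consistent_ops, bw_consistent_ops, bw_inconsistent_ops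
-- ):
--     good = _index(bw_consistent_ops)
--     bad_bases = {b for (b, _s) in _index(bw_inconsistent_ops)}
--     both_consistent_ops = []
--     both_consistent_ops_bw = []
--     for op in consistent_ops:
--         base = op.rstrip('_')
--         if base in bad_bases:
--             continue
--         both_consistent_ops.append(op)
--         both_consistent_ops_bw.extend(
--             base + s for s in GRAD_SUFFIXES if (base, s) in good
--         )
--     return both_consistent_ops, both_consistent_ops_bw
-- ===== Notes on version B (the rewrite author's own statement) =====
-- stated objective: faster
-- what changed: Instead of generating three candidate names per op and scanning the bw lists for each, B inverts the direction: it builds hash-set indexes once from the bw lists (decomposing each bw name into (base, grad-suffix) pairs), then each op does O(1) lookups by its rstripped base.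
import Mathlib
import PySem

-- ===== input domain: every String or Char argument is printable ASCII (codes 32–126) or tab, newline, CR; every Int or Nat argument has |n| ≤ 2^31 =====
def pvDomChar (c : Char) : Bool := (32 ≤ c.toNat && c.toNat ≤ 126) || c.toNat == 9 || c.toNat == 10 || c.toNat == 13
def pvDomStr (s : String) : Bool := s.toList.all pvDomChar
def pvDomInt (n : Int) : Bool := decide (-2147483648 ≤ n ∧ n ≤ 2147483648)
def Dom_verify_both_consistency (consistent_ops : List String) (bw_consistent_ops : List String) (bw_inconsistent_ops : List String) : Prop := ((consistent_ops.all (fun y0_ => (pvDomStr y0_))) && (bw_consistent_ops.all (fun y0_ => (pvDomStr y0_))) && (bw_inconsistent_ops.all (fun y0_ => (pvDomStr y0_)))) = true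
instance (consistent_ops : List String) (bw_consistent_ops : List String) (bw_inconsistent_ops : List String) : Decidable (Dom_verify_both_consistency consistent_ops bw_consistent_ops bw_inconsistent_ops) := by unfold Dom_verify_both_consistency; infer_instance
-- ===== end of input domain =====

-- B inverts the membership direction: it indexes the bw lists once into (base, grad-suffix)
-- hash sets, so each op does O(1) lookups instead of scanning both bw lists.

-- ===== PORT A =====
-- hand port of s.rstrip('_'): drop trailing '_' characters (exact: rstrip with a char set)
def pvRstripU (s : String) : String :=
  String.ofList ((s.toList.reverse.dropWhile (fun c => c == '_')).reverse)

-- inner 'for grad_suffix in [...]' loop with its break: recursion over the suffix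
-- list carrying (ops_bw); returns (both_consistent, ops_bw), false when the break fires
def vbcInner (op : String) (bw_consistent_ops bw_inconsistent_ops : List String) :
    List String → List String → Bool × List String
  | [], ops_bw => (true, ops_bw)
  | grad_suffix :: rest, ops_bw =>
    let bw_op := pvRstripU op ++ grad_suffix
    let ops_bw := if bw_consistent_ops.contains bw_op then ops_bw ++ [bw_op] else ops_bw
    if bw_inconsistent_ops.contains bw_op then (false, ops_bw)
    else vbcInner op bw_consistent_ops bw_inconsistent_ops rest ops_bw

def verify_both_consistency (consistent_ops : List String) (bw_consistent_ops : List String) (bw_inconsistent_ops : List String) : List String × List String :=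
  consistent_ops.foldl (fun acc op =>
    let r := vbcInner op bw_consistent_ops bw_inconsistent_ops
      ["_grad", "_double_grad", "_triple_grad"] []
    if r.1 then (acc.1 ++ [op], acc.2 ++ r.2) else acc) ([], [])

-- ===== PORT B =====
-- bw[:-len(s)] : string slice dropping the suffix's length from the end
def pvStripSuffix (bw s : String) : String :=
  String.ofList (PySem.Chars.slice bw.toList none (some (-(PySem.Str.len s))))

-- inner 'for s in GRAD_SUFFIXES: if bw.endswith(s): keys.add((bw[:-len(s)], s))' of _index
def bwIndexStep (keys : PySem.Set (String × String)) (bw : String) : PySem.Set (String × String) :=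
  ["_grad", "_double_grad", "_triple_grad"].foldl (fun keys s =>
    if PySem.Str.endswith bw s then PySem.Set.add keys (pvStripSuffix bw s, s) else keys) keys

-- _index(bw_list): the set of (base, suffix) decompositions of the bw names
def bwIndex (bw_list : List String) : PySem.Set (String × String) :=
  bw_list.foldl bwIndexStep PySem.Set.empty

def verify_both_consistency_alt (consistent_ops : List String) (bw_consistent_ops : List String) (bw_inconsistent_ops : List String) : List String × List String :=
  let good := bwIndex bw_consistent_ops
  let bad_bases := PySem.Set.ofList ((bwIndex bw_inconsistent_ops).map Prod.fst)
  consistent_ops.foldl (fun acc op =>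
    let base := pvRstripU op
    if PySem.Set.contains bad_bases base then acc
    else (acc.1 ++ [op],
      acc.2 ++ (["_grad", "_double_grad", "_triple_grad"].filter
        (fun s => PySem.Set.contains good (base, s))).map (fun s => base ++ s)))
    ([], [])

-- ===== PRECONDITION & SPEC =====
def Spec_verify_both_consistency (consistent_ops : List String) (bw_consistent_ops : List String) (bw_inconsistent_ops : List String) (out : List String × List String) : Prop := out = verify_both_consistency_alt consistent_ops bw_consistent_ops bw_inconsistent_ops
instance (consistent_ops : List String) (bw_consistent_ops : List String) (bw_inconsistent_ops : List String) (out : List String × List String) : Decidable (Spec_verify_both_consistency consistent_ops bw_consistent_ops bw_inconsistent_ops out) := by unfold Spec_verify_both_consistency; infer_instance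

-- ===== CLAIM =====
def Claim_equal_verify_both_consistency : Prop := ∀ (consistent_ops : List String) (bw_consistent_ops : List String) (bw_inconsistent_ops : List String), Dom_verify_both_consistency consistent_ops bw_consistent_ops bw_inconsistent_ops → Spec_verify_both_consistency consistent_ops bw_consistent_ops bw_inconsistent_ops (verify_both_consistency consistent_ops bw_consistent_ops bw_inconsistent_ops)

-- ===== LEMMAS AND PROOFS =====

theorem bool_eq_of_iff {a b : Bool} (h : a = true ↔ b = true) : a = b := by
  cases a <;> cases b <;> simp_all

-- a char list decomposes as b ++ t iff t is a suffix and dropping |t| from the end gives b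
theorem chars_decomp (bw b t : List Char) :
    (t <:+ bw ∧ bw.take (bw.length - t.length) = b) ↔ bw = b ++ t := by
  constructor
  · rintro ⟨⟨a, rfl⟩, hb⟩
    simp at hb
    subst hb; rfl
  · rintro rfl
    exact ⟨⟨b, rfl⟩, by simp⟩

-- string form: endswith + the [:-len(s)] slice characterize concatenation (s nonempty)
theorem strip_decomp (bw b s : String) (hs : s.toList ≠ []) :
    (PySem.Str.endswith bw s = true ∧ pvStripSuffix bw s = b) ↔ bw = b ++ s := by
  have hk : 0 < s.toList.length := Nat.pos_of_ne_zero (fun h => hs (List.length_eq_zero_iff.1 h))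
  have hto : ∀ (x y : String), x.toList = y.toList → x = y := fun x y h => by
    have := congrArg String.ofList h; simpa using this
  have hsl : pvStripSuffix bw s
      = String.ofList (bw.toList.take (bw.toList.length - s.toList.length)) := by
    have hlen : PySem.Str.len s = (s.toList.length : Int) := by simp [pysem]
    unfold pvStripSuffix
    rw [hlen]
    simp only [PySem.Chars.slice_eq_listSlice]
    rw [PySem.List.slice_to_neg_natCast bw.toList s.toList.length hk]
  constructor
  · rintro ⟨he, hb⟩
    rw [PySem.Str.endswith_eq, PySem.Chars.endswith_iff] at he
    have hb' : bw.toList.take (bw.toList.length - s.toList.length) = b.toList := by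
      have h2 := congrArg String.toList (hsl ▸ hb)
      simpa using h2
    have hbw : bw.toList = b.toList ++ s.toList := (chars_decomp _ _ _).1 ⟨he, hb'⟩
    exact hto _ _ (by simp [hbw])
  · rintro rfl
    refine ⟨?_, ?_⟩
    · rw [PySem.Str.endswith_eq, PySem.Chars.endswith_iff]
      simp
    · rw [hsl]
      refine hto _ _ ?_
      simp


theorem suffix_ne_nil :
    ∀ s ∈ (["_grad", "_double_grad", "_triple_grad"] : List String), s.toList ≠ [] := by
  decide

-- membership after one _index outer-loop step
theorem mem_if_add {κ : Type} [BEq κ] [LawfulBEq κ] (k : PySem.Set κ) (c : Prop)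
    [Decidable c] (q p : κ) :
    (p ∈ (if c then PySem.Set.add k q else k)) ↔ (c ∧ p = q) ∨ p ∈ k := by
  split_ifs with h <;> simp only [PySem.Set.mem_add, h] <;> tauto

theorem mem_bwIndexStep (keys : PySem.Set (String × String)) (bw : String)
    (p : String × String) :
    p ∈ bwIndexStep keys bw ↔ p ∈ keys ∨
      ∃ s ∈ (["_grad", "_double_grad", "_triple_grad"] : List String),
        PySem.Str.endswith bw s = true ∧ p = (pvStripSuffix bw s, s) := by
  unfold bwIndexStep
  simp only [List.foldl_cons, List.foldl_nil]
  simp only [mem_if_add, List.mem_cons, List.not_mem_nil, or_false, exists_eq_or_imp,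
    exists_eq_left]
  constructor
  · rintro (h | h | h | h)
    · exact Or.inr (Or.inr (Or.inr h))
    · exact Or.inr (Or.inr (Or.inl h))
    · exact Or.inr (Or.inl h)
    · exact Or.inl h
  · rintro (h | h | h | h)
    · exact Or.inr (Or.inr (Or.inr h))
    · exact Or.inr (Or.inr (Or.inl h))
    · exact Or.inr (Or.inl h)
    · exact Or.inl h

-- membership in the whole _index fold, generalized over the accumulator
theorem mem_foldl_bwIndexStep (l : List String) (keys : PySem.Set (String × String))
    (p : String × String) :
    p ∈ l.foldl bwIndexStep keys ↔ p ∈ keys ∨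
      ∃ bw ∈ l, ∃ s ∈ (["_grad", "_double_grad", "_triple_grad"] : List String),
        PySem.Str.endswith bw s = true ∧ p = (pvStripSuffix bw s, s) := by
  induction l generalizing keys with
  | nil => simp
  | cons bw rest ih =>
    simp only [List.foldl_cons]
    rw [ih, mem_bwIndexStep]
    simp only [List.mem_cons]
    constructor
    · rintro ((h | ⟨s, hs, he, hp⟩) | ⟨bw', hbw', rest'⟩)
      · exact Or.inl h
      · exact Or.inr ⟨bw, Or.inl rfl, s, hs, he, hp⟩
      · exact Or.inr ⟨bw', Or.inr hbw', rest'⟩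
    · rintro (h | ⟨bw', (rfl | hbw'), rest'⟩)
      · exact Or.inl (Or.inl h)
      · exact Or.inl (Or.inr rest')
      · exact Or.inr ⟨bw', hbw', rest'⟩

-- (b, s) ∈ _index(l)  ↔  b ++ s ∈ l   (for one of the three grad suffixes)
theorem pair_mem_bwIndex (l : List String) (b s : String)
    (hs : s ∈ (["_grad", "_double_grad", "_triple_grad"] : List String)) :
    (b, s) ∈ bwIndex l ↔ (b ++ s) ∈ l := by
  unfold bwIndex
  rw [mem_foldl_bwIndexStep]
  constructor
  · rintro (h | ⟨bw, hbw, s', hs', he, hp⟩)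
    · simp [PySem.Set.empty] at h
    · have hfst : b = pvStripSuffix bw s' := congrArg Prod.fst hp
      have hsnd : s = s' := congrArg Prod.snd hp
      subst hsnd
      have hbw2 : bw = b ++ s := (strip_decomp bw b s (suffix_ne_nil s hs)).1 ⟨he, hfst.symm⟩
      exact hbw2 ▸ hbw
  · intro h
    right
    have hd := (strip_decomp (b ++ s) b s (suffix_ne_nil s hs)).2 rfl
    exact ⟨b ++ s, h, s, hs, hd.1, by rw [hd.2]⟩

-- b occurs as a base in _index(l) ↔ some grad-suffixed completion of b is in l
theorem fst_mem_bwIndex (l : List String) (b : String) :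
    b ∈ (bwIndex l).map Prod.fst ↔
      ∃ s ∈ (["_grad", "_double_grad", "_triple_grad"] : List String), (b ++ s) ∈ l := by
  rw [List.mem_map]
  constructor
  · rintro ⟨p, hp, rfl⟩
    unfold bwIndex at hp
    rw [mem_foldl_bwIndexStep] at hp
    rcases hp with h | ⟨bw, hbw, s', hs', he, rfl⟩
    · simp [PySem.Set.empty] at h
    · refine ⟨s', hs', ?_⟩
      have hbw2 : bw = pvStripSuffix bw s' ++ s' :=
        (strip_decomp bw (pvStripSuffix bw s') s' (suffix_ne_nil s' hs')).1 ⟨he, rfl⟩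
      exact hbw2 ▸ hbw
  · rintro ⟨s, hs, h⟩
    exact ⟨(b, s), (pair_mem_bwIndex l b s hs).2 h, rfl⟩

theorem contains_good (bwc : List String) (b s : String)
    (hs : s ∈ (["_grad", "_double_grad", "_triple_grad"] : List String)) :
    PySem.Set.contains (bwIndex bwc) (b, s) = bwc.contains (b ++ s) := by
  apply bool_eq_of_iff
  simp [PySem.Set.contains, pair_mem_bwIndex bwc b s hs]

theorem contains_bad (bwi : List String) (b : String) :
    PySem.Set.contains (PySem.Set.ofList ((bwIndex bwi).map Prod.fst)) b
      = (["_grad", "_double_grad", "_triple_grad"] : List String).any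
          (fun s => bwi.contains (b ++ s)) := by
  apply bool_eq_of_iff
  simp [PySem.Set.contains, PySem.Set.mem_ofList, fst_mem_bwIndex]

-- A's fold step equals the intermediate candidate-list formulation
theorem vbc_step_eq (bwc bwi : List String) (acc : List String × List String) (op : String) :
    (let r := vbcInner op bwc bwi ["_grad", "_double_grad", "_triple_grad"] []
     if r.1 then (acc.1 ++ [op], acc.2 ++ r.2) else acc) =
    (let bw_ops := ["_grad", "_double_grad", "_triple_grad"].map (fun s => pvRstripU op ++ s)
     if bw_ops.any (fun bw => bwi.contains bw) then acc
     else (acc.1 ++ [op], acc.2 ++ bw_ops.filter (fun bw => bwc.contains bw))) := by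
  simp only [vbcInner, List.map, List.any, List.filter]
  cases h1 : bwi.contains (pvRstripU op ++ "_grad") <;>
  cases h2 : bwi.contains (pvRstripU op ++ "_double_grad") <;>
  cases h3 : bwi.contains (pvRstripU op ++ "_triple_grad") <;>
  cases g1 : bwc.contains (pvRstripU op ++ "_grad") <;>
  cases g2 : bwc.contains (pvRstripU op ++ "_double_grad") <;>
  cases g3 : bwc.contains (pvRstripU op ++ "_triple_grad") <;>
  simp_all

-- B's fold step equals the same intermediate formulation
theorem alt_step_eq (bwc bwi : List String) (acc : List String × List String) (op : String) :
    (let base := pvRstripU op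
     if PySem.Set.contains (PySem.Set.ofList ((bwIndex bwi).map Prod.fst)) base then acc
     else (acc.1 ++ [op],
       acc.2 ++ (["_grad", "_double_grad", "_triple_grad"].filter
         (fun s => PySem.Set.contains (bwIndex bwc) (base, s))).map (fun s => base ++ s))) =
    (let bw_ops := ["_grad", "_double_grad", "_triple_grad"].map (fun s => pvRstripU op ++ s)
     if bw_ops.any (fun bw => bwi.contains bw) then acc
     else (acc.1 ++ [op], acc.2 ++ bw_ops.filter (fun bw => bwc.contains bw))) := by
  simp only
  rw [contains_bad]
  rw [List.filter_congr (fun s hs => contains_good bwc (pvRstripU op) s hs)]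
  simp only [List.map, List.any, List.filter]
  cases h1 : bwi.contains (pvRstripU op ++ "_grad") <;>
  cases h2 : bwi.contains (pvRstripU op ++ "_double_grad") <;>
  cases h3 : bwi.contains (pvRstripU op ++ "_triple_grad") <;>
  cases g1 : bwc.contains (pvRstripU op ++ "_grad") <;>
  cases g2 : bwc.contains (pvRstripU op ++ "_double_grad") <;>
  cases g3 : bwc.contains (pvRstripU op ++ "_triple_grad") <;>
  simp_all

theorem vbc_foldl_eq (bwc bwi : List String) (l : List String)
    (acc : List String × List String) :
    l.foldl (fun acc op =>
      let r := vbcInner op bwc bwi ["_grad", "_double_grad", "_triple_grad"] []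
      if r.1 then (acc.1 ++ [op], acc.2 ++ r.2) else acc) acc =
    l.foldl (fun acc op =>
      let base := pvRstripU op
      if PySem.Set.contains (PySem.Set.ofList ((bwIndex bwi).map Prod.fst)) base then acc
      else (acc.1 ++ [op],
        acc.2 ++ (["_grad", "_double_grad", "_triple_grad"].filter
          (fun s => PySem.Set.contains (bwIndex bwc) (base, s))).map (fun s => base ++ s))) acc := by
  induction l generalizing acc with
  | nil => rfl
  | cons op rest ih =>
    simp only [List.foldl_cons]
    rw [vbc_step_eq, ← alt_step_eq]
    exact ih _

-- ===== VERDICT (by name: the statement is the Claim_ definition above) =====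
theorem verify_both_consistency_spec : Claim_equal_verify_both_consistency := by
  intro c bwc bwi _
  unfold Spec_verify_both_consistency verify_both_consistency verify_both_consistency_alt
  exact vbc_foldl_eq bwc bwi c ([], [])
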